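-- pv_equiv track=rewrite | github.com/jgregoriods/santiago-staff | discourse.py | glyph_bound
-- ===== SOURCE A (Python) =====
-- def glyph_bound(glyph, text):
--     start = end = None
--     for i in range(len(text)):
--         if glyph in text[i]:
--             if start is None:
--                 start = i
--             end = i
--     return (start, end)
-- ===== SOURCE B (Python) =====
-- def glyph_bound(glyph, text):
--     n = len(text)
--     start = next((i for i in range(n) if glyph in text[i]), None)
--     end = next((i for i in range(n - 1, -1, -1) if glyph in text[i]), None)
--     return (start, end)
-- ===== Notes on version B (the rewrite author's own statement) =====
-- stated objective: alternative
-- what changed: Replaces the single combined pass that maintains both bounds with two independent directional scans: a forward scan returning the first matching index and an explicit backward scan over range(len(text)-1,-1,-1) returning the last.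
import Mathlib
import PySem

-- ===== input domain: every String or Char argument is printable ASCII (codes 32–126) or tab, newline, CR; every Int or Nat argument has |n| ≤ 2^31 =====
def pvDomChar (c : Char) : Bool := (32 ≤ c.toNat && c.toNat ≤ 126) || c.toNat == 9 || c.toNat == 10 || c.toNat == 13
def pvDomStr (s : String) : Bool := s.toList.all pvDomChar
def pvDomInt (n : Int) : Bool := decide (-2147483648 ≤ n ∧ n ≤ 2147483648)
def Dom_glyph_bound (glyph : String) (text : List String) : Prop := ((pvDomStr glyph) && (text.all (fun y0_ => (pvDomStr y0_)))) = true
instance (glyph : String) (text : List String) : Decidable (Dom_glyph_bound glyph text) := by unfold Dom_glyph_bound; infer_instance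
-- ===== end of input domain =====

-- B computes the two bounds by two independent directional scans (forward first match, backward last match) instead of A's single combined pass; return values proved equal.


-- ===== PORT A =====
def glyph_bound (glyph : String) (text : List String) : Option Int × Option Int :=
  (PySem.List.enumerate text).foldl
    (fun st p =>
      if PySem.Str.isIn glyph p.2 then
        ((if st.1 = none then some p.1 else st.1), some p.1)
      else st)
    (none, none)

-- ===== PORT B =====
def glyph_bound_alt (glyph : String) (text : List String) : Option Int × Option Int :=
  let e := PySem.List.enumerate text
  let start := (e.find? (fun p => PySem.Str.isIn glyph p.2)).map (·.1)
  let stop := (e.reverse.find? (fun p => PySem.Str.isIn glyph p.2)).map (·.1)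
  (start, stop)

-- ===== PRECONDITION & SPEC =====
def Spec_glyph_bound (glyph : String) (text : List String) (out : Option Int × Option Int) : Prop := out = glyph_bound_alt glyph text
instance (glyph : String) (text : List String) (out : Option Int × Option Int) : Decidable (Spec_glyph_bound glyph text out) := by unfold Spec_glyph_bound; infer_instance

-- ===== CLAIM (what is proved, stated in full; the proofs are below) =====
def Claim_equal_glyph_bound : Prop := ∀ (glyph : String) (text : List String), Dom_glyph_bound glyph text → Spec_glyph_bound glyph text (glyph_bound glyph text)

-- ===== LEMMAS AND PROOFS =====

-- ===== VERDICT (by name: the statement is the Claim_ definition above) =====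
lemma glyph_loop_spec (q : Int × String → Bool) :
    ∀ (l : List (Int × String)) (st : Option Int × Option Int),
      l.foldl (fun st p => if q p then ((if st.1 = none then some p.1 else st.1), some p.1) else st) st
        = ((if st.1 = none then (l.find? q).map (·.1) else st.1),
           match (l.reverse.find? q).map (·.1) with
           | some v => some v
           | none => st.2) := by
  intro l
  induction l with
  | nil =>
      intro st
      obtain ⟨a, b⟩ := st
      cases a <;> simp
  | cons p l ih =>
      intro st
      simp only [List.foldl_cons, List.find?_cons, List.reverse_cons, List.find?_append]
      by_cases h : q p = true
      · rw [ih]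
        cases hs : st.1 <;> cases hr : (l.reverse.find? q) <;> simp [h]
      · rw [ih]
        cases hr : (l.reverse.find? q) <;> simp [h]

theorem glyph_bound_spec : Claim_equal_glyph_bound := by
  intro glyph text _
  unfold Spec_glyph_bound glyph_bound glyph_bound_alt
  rw [glyph_loop_spec]
  dsimp only
  cases h : ((PySem.List.enumerate text).reverse.find? (fun p => PySem.Str.isIn glyph p.2)) <;> rfl
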